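-- pv_equiv track=rewrite | github.com/Yakov-Jak/Python-Prj | 03-Lesson/05-Sum_sum.py | summator
-- ===== SOURCE A (Python) =====
-- def summator(num, nu):
--     summa = nu
--     num = list((num.title()).split())
--     for i in num:
--         if i.isdigit():
--             summa = summa + int(i)
--         elif i == 'Стоп':
--             return summa, 'Stop'
--         else:
--             return summa, 'Continue'
--     return summa, 'Continue'
-- ===== SOURCE B (Python) =====
-- def summator(num, nu):
--     # Character-level scanner: walks the title-cased string once, char by char,
--     # building each token's decimal value by Horner's rule (val*10 + digit) and a
--     # numeric flag on the fly -- no split(), no int(), no str.isdigit() on tokens.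
--     summa = nu
--     s = num.title()
--     n = len(s)
--     i = 0
--     while i < n:
--         if s[i].isspace():
--             i += 1
--             continue
--         start = i
--         val = 0
--         numeric = True
--         while i < n and not s[i].isspace():
--             c = s[i]
--             if '0' <= c <= '9':
--                 val = val * 10 + (ord(c) - 48)
--             else:
--                 numeric = False
--             i += 1
--         if numeric:
--             summa += val
--         else:
--             return summa, ('Stop' if s[start:i] == 'Стоп' else 'Continue')
--     return summa, 'Continue'
-- ===== Notes on version B (the rewrite author's own statement) =====
-- stated objective: alternative
-- what changed: B replaces A's token pipeline (split the title-cased string, test each token with isdigit, convert with int) by a single character-level scan that skips whitespace and reads each token char by char, building its decimal value incrementally by Horner's rule and a numeric flag, so split(), int() and str.isdigit() on tokens disappear.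
import Mathlib
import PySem

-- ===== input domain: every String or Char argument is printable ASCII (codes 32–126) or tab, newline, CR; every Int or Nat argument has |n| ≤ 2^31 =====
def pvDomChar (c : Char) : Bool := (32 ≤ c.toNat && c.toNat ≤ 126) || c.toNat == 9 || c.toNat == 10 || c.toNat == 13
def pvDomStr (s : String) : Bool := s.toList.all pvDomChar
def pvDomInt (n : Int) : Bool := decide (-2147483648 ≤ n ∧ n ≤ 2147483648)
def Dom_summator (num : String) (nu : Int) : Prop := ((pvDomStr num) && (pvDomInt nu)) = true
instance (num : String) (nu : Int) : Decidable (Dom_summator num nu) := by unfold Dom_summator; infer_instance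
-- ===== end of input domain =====

-- B replaces A's token loop (split, isdigit, int per token) by a single character-level
-- scan of the title-cased string that builds each token's value by Horner's rule
-- (objective: alternative algorithm, same cost).

-- str.title(), hand-ported (PySem has no title); exact on the ASCII domain, where a
-- character is cased iff it is an ASCII letter.
def pvTitleChars : List Char → Bool → List Char
  | [], _ => []
  | c :: rest, prevCased =>
    (if PySem.Chars.isalpha c then
       (if prevCased then PySem.Chars.lowerChar c else PySem.Chars.upperChar c)
     else c) :: pvTitleChars rest (PySem.Chars.isalpha c)

def pvTitle (s : String) : String := String.ofList (pvTitleChars s.toList false)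

-- ===== PORT A =====
-- int(i), hand-ported as the left-to-right decimal read; exact for the nonempty
-- all-ASCII-digit strings on which A's 'i.isdigit()' guard lets it be called.
def pvIntOfDigits (t : List Char) : Int :=
  t.foldl (fun v c => v * 10 + ((c.toNat : Int) - 48)) 0

-- A's for-loop over the split tokens, with its early returns
def pvSumLoop : List String → Int → Int × String
  | [], summa => (summa, "Continue")
  | i :: rest, summa =>
    if PySem.Str.strIsdigit i then pvSumLoop rest (summa + pvIntOfDigits i.toList)
    else if i = "Стоп" then (summa, "Stop")
    else (summa, "Continue")

def summator (num : String) (nu : Int) : Int × String :=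
  pvSumLoop (PySem.Str.split₀ (pvTitle num)) nu

-- ===== PORT B =====
-- B's inner while loop: consume one token (the maximal run of non-space characters),
-- carrying the token read so far (reversed, for s[start:i]), its Horner value and the
-- numeric flag; returns (token, val, numeric, remaining characters).
def pvTok : List Char → List Char → Int → Bool → List Char × Int × Bool × List Char
  | [], acc, val, numeric => (acc.reverse, val, numeric, [])
  | c :: rest, acc, val, numeric =>
    if PySem.Chars.isspace c then (acc.reverse, val, numeric, c :: rest)
    else if PySem.Chars.isdigit c then          -- '0' <= c <= '9'
      pvTok rest (c :: acc) (val * 10 + ((c.toNat : Int) - 48)) numeric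
    else pvTok rest (c :: acc) val false

-- used by pvScan's decreasing_by
lemma pvTok_rest_length : ∀ (cs acc : List Char) (v : Int) (b : Bool),
    (pvTok cs acc v b).2.2.2.length ≤ cs.length := by
  intro cs
  induction cs with
  | nil => intro acc v b; simp [pvTok]
  | cons c rest ih =>
    intro acc v b
    by_cases h : PySem.Chars.isspace c = true
    · simp [pvTok, h]
    · by_cases hd : PySem.Chars.isdigit c = true
      · simp only [pvTok, h, hd, if_false, Bool.false_eq_true]
        exact le_trans (ih _ _ _) (by simp)
      · simp only [pvTok, h, hd, if_false, Bool.false_eq_true]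
        exact le_trans (ih _ _ _) (by simp)

-- B's outer while loop: skip whitespace, read a token, add its value or classify it
def pvScan : List Char → Int → Int × String
  | [], summa => (summa, "Continue")
  | c :: rest, summa =>
    if PySem.Chars.isspace c then pvScan rest summa
    else
      let r := pvTok (c :: rest) [] 0 true
      if r.2.2.1 then pvScan r.2.2.2 (summa + r.2.1)
      else (summa, if String.ofList r.1 = "Стоп" then "Stop" else "Continue")
termination_by cs _ => cs.length
decreasing_by
  · simp
  · show (pvTok (c :: rest) [] 0 true).2.2.2.length < (c :: rest).length
    have h1 : PySem.Chars.isspace c = false := by simp_all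
    by_cases hd : PySem.Chars.isdigit c = true <;>
      simp only [pvTok, h1, hd, if_true, if_false, Bool.false_eq_true] <;>
      exact Nat.lt_succ_of_le (pvTok_rest_length _ _ _ _)

def summator_alt (num : String) (nu : Int) : Int × String :=
  pvScan (pvTitle num).toList nu

-- ===== PRECONDITION & SPEC =====
def Spec_summator (num : String) (nu : Int) (out : Int × String) : Prop := out = summator_alt num nu
instance (num : String) (nu : Int) (out : Int × String) : Decidable (Spec_summator num nu out) := by unfold Spec_summator; infer_instance

-- ===== CLAIM (what is proved, stated in full; the proofs are below) =====
def Claim_equal_summator : Prop := ∀ (num : String) (nu : Int), Dom_summator num nu → Spec_summator num nu (summator num nu)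

-- ===== LEMMAS AND PROOFS =====

-- pvTok reads exactly the leading non-space run, Horner-evaluating its digits
lemma pvTok_spec : ∀ (cs acc : List Char) (v : Int) (b : Bool),
    pvTok cs acc v b =
      (acc.reverse ++ cs.takeWhile (fun x => !PySem.Chars.isspace x),
       (cs.takeWhile (fun x => !PySem.Chars.isspace x)).foldl
         (fun w c => if PySem.Chars.isdigit c then w * 10 + ((c.toNat : Int) - 48) else w) v,
       b && (cs.takeWhile (fun x => !PySem.Chars.isspace x)).all PySem.Chars.isdigit,
       cs.dropWhile (fun x => !PySem.Chars.isspace x)) := by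
  intro cs
  induction cs with
  | nil => intro acc v b; simp [pvTok]
  | cons c rest ih =>
    intro acc v b
    by_cases h : PySem.Chars.isspace c = true
    · simp [pvTok, h]
    · by_cases hd : PySem.Chars.isdigit c = true <;>
        simp [pvTok, h, hd, ih]

-- split₀'s worker pushes the whole current token before resuming at the next gap
lemma pvGo_token : ∀ (cs cur : List Char) (accs : List (List Char)), cur ≠ [] →
    PySem.Chars.split₀.go cs cur accs =
      PySem.Chars.split₀.go (cs.dropWhile (fun x => !PySem.Chars.isspace x)) []
        ((cur.reverse ++ cs.takeWhile (fun x => !PySem.Chars.isspace x)) :: accs) := by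
  intro cs
  induction cs with
  | nil =>
    intro cur accs hcur
    simp [PySem.Chars.split₀.go, List.isEmpty_iff, hcur]
  | cons c rest ih =>
    intro cur accs hcur
    by_cases h : PySem.Chars.isspace c = true
    · simp [PySem.Chars.split₀.go, h, List.isEmpty_iff, hcur]
    · simp only [PySem.Chars.split₀.go, h, Bool.false_eq_true, if_false,
        List.takeWhile_cons, List.dropWhile_cons, Bool.not_false, if_true]
      rw [ih _ accs (by simp)]
      simp

-- the token accumulator distributes over the result
lemma pvGo_acc : ∀ (n : Nat) (cs : List Char) (accs : List (List Char)), cs.length ≤ n →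
    PySem.Chars.split₀.go cs [] accs =
      accs.reverse ++ PySem.Chars.split₀.go cs [] [] := by
  intro n
  induction n with
  | zero =>
    intro cs accs hlen
    have : cs = [] := by cases cs <;> simp_all
    subst this; simp [PySem.Chars.split₀.go]
  | succ n ih =>
    intro cs accs hlen
    cases cs with
    | nil => simp [PySem.Chars.split₀.go]
    | cons c rest =>
      by_cases h : PySem.Chars.isspace c = true
      · simp only [PySem.Chars.split₀.go, h, if_true, List.isEmpty_nil]
        exact ih rest accs (by simpa using hlen)
      · simp only [PySem.Chars.split₀.go, h, Bool.false_eq_true, if_false]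
        rw [pvGo_token rest [c] accs (by simp), pvGo_token rest [c] [] (by simp)]
        have hdl : (rest.dropWhile (fun x => !PySem.Chars.isspace x)).length ≤ n := by
          have := List.length_dropWhile_le (fun x => !PySem.Chars.isspace x) rest
          simp at hlen; omega
        rw [ih _ ((List.reverse [c] ++ rest.takeWhile (fun x => !PySem.Chars.isspace x)) :: accs) hdl,
            ih _ [List.reverse [c] ++ rest.takeWhile (fun x => !PySem.Chars.isspace x)] hdl]
        simp

-- split₀ at a non-space head: the first token is the leading non-space run
lemma pvSplit₀_cons_of_not_space (c : Char) (rest : List Char)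
    (h : PySem.Chars.isspace c = false) :
    PySem.Chars.split₀ (c :: rest) =
      (c :: rest.takeWhile (fun x => !PySem.Chars.isspace x)) ::
        PySem.Chars.split₀ (rest.dropWhile (fun x => !PySem.Chars.isspace x)) := by
  show PySem.Chars.split₀.go (c :: rest) [] [] = _
  simp only [PySem.Chars.split₀.go, h, Bool.false_eq_true, if_false]
  rw [pvGo_token rest [c] [] (by simp)]
  rw [pvGo_acc (rest.dropWhile (fun x => !PySem.Chars.isspace x)).length _ _ le_rfl]
  rfl

lemma pvSplit₀_cons_of_space (c : Char) (rest : List Char)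
    (h : PySem.Chars.isspace c = true) :
    PySem.Chars.split₀ (c :: rest) = PySem.Chars.split₀ rest := by
  show PySem.Chars.split₀.go (c :: rest) [] [] = PySem.Chars.split₀.go rest [] []
  simp [PySem.Chars.split₀.go, h]

-- on an all-digit token the guarded Horner step is the plain decimal read
lemma pvFold_digits : ∀ (t : List Char) (v : Int), t.all PySem.Chars.isdigit = true →
    t.foldl (fun w c => if PySem.Chars.isdigit c then w * 10 + ((c.toNat : Int) - 48) else w) v =
      t.foldl (fun w c => w * 10 + ((c.toNat : Int) - 48)) v := by
  intro t
  induction t with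
  | nil => intro v _; rfl
  | cons c rest ih =>
    intro v h
    simp only [List.all_cons, Bool.and_eq_true] at h
    simp [List.foldl_cons, h.1, ih _ h.2]

-- the char-level scan computes A's token loop
lemma pvScan_eq_sumLoop : ∀ (n : Nat) (cs : List Char) (s : Int), cs.length ≤ n →
    pvScan cs s = pvSumLoop ((PySem.Chars.split₀ cs).map String.ofList) s := by
  intro n
  induction n with
  | zero =>
    intro cs s hlen
    have : cs = [] := by cases cs <;> simp_all
    subst this
    simp [pvScan, pvSumLoop, PySem.Chars.split₀, PySem.Chars.split₀.go]
  | succ n ih =>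
    intro cs s hlen
    cases cs with
    | nil => simp [pvScan, pvSumLoop, PySem.Chars.split₀, PySem.Chars.split₀.go]
    | cons c rest =>
      by_cases h : PySem.Chars.isspace c = true
      · rw [pvSplit₀_cons_of_space c rest (by simp_all)]
        simp only [pvScan, h, if_true]
        exact ih rest s (by simpa using hlen)
      · rw [pvSplit₀_cons_of_not_space c rest (by simp_all)]
        have htw : List.takeWhile (fun x => !PySem.Chars.isspace x) (c :: rest) =
            c :: List.takeWhile (fun x => !PySem.Chars.isspace x) rest :=
          List.takeWhile_cons_of_pos (by simp_all)
        have hdw : List.dropWhile (fun x => !PySem.Chars.isspace x) (c :: rest) =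
            List.dropWhile (fun x => !PySem.Chars.isspace x) rest :=
          List.dropWhile_cons_of_pos (by simp_all)
        simp only [pvScan, h, Bool.false_eq_true, if_false, pvTok_spec, htw, hdw,
          List.reverse_nil, List.nil_append, List.map_cons, List.all_cons, Bool.true_and]
        set t := rest.takeWhile (fun x => !PySem.Chars.isspace x) with ht
        set r := rest.dropWhile (fun x => !PySem.Chars.isspace x) with hr
        have hdig : PySem.Str.strIsdigit (String.ofList (c :: t)) =
            (PySem.Chars.isdigit c && t.all PySem.Chars.isdigit) := by
          simp [PySem.Str.strIsdigit_eq, PySem.Chars.strIsdigit]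
        have hrn : r.length ≤ n := by
          have := List.length_dropWhile_le (fun x => !PySem.Chars.isspace x) rest
          rw [hr]
          simp at hlen; omega
        by_cases hall : (PySem.Chars.isdigit c && t.all PySem.Chars.isdigit) = true
        · -- numeric token: both add its decimal value and continue
          have hc : PySem.Chars.isdigit c = true := (Bool.and_eq_true .. ▸ hall).1
          have htall : t.all PySem.Chars.isdigit = true := (Bool.and_eq_true .. ▸ hall).2
          simp only [pvSumLoop, hdig, hall, if_true]
          rw [ih r _ hrn]
          congr 2
          -- the summed value matches int(token)
          have hlist : (String.ofList (c :: t)).toList = c :: t := by simp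
          simp only [pvIntOfDigits, hlist, List.foldl_cons, hc, if_true]
          exact pvFold_digits t _ htall
        · -- non-numeric token: both classify the token and stop
          have hallf : (PySem.Chars.isdigit c && t.all PySem.Chars.isdigit) = false := by
            simp_all
          simp only [pvSumLoop, hdig, hallf, Bool.false_eq_true, if_false]
          split_ifs with hstop <;> rfl

-- ===== VERDICT (by name: the statement is the Claim_ definition above) =====
theorem summator_spec : Claim_equal_summator := by
  intro num nu _
  unfold Spec_summator summator summator_alt PySem.Str.split₀
  exact (pvScan_eq_sumLoop _ _ nu le_rfl).symm
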